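-- pv_equiv track=rewrite | github.com/Namdoooo/raxtax_extension | utils.py | sequence_to_kmer_set
-- ===== SOURCE A (Python) =====
-- def kmer_to_index(kmer: str) -> int:
--     base_to_bits = {'A': 0, 'C': 1, 'G': 2, 'T': 3}
--     index = 0
--     for base in kmer:
--         if base not in base_to_bits:
--             return -1
--         index = (index << 2) | base_to_bits[base]
--     return index
--
-- def sequence_to_kmer_set(seq: str, k: int = 8) -> list[int]:
--     kmer_set = set()
--
--     for i in range(len(seq) - k + 1):
--         kmer = seq[i:i + k]
--         index = kmer_to_index(kmer)
--         if index != -1: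
--             kmer_set.add(index)
--
--     return sorted(kmer_set)
-- ===== SOURCE B (Python) =====
-- def sequence_to_kmer_set(seq: str, k: int = 8) -> list[int]:
--     # Rolling-window O(n): update the base-4 index with a shift+mask and track the
--     # last invalid-base position; a window's index is valid once k consecutive
--     # valid bases have been seen.
--     if k <= 0:
--         # every window is the empty k-mer, whose index is 0
--         return [0]
--     n = len(seq)
--     if k > n:
--         return []
--     code = {'A': 0, 'C': 1, 'G': 2, 'T': 3}
--     mask = (1 << (2 * k)) - 1
--     idx = 0
--     last_bad = -1
--     found = set()
--     for i, ch in enumerate(seq):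
--         b = code.get(ch)
--         if b is None:
--             last_bad = i
--         else:
--             idx = ((idx << 2) | b) & mask
--             if i - last_bad >= k:
--                 found.add(idx)
--     return sorted(found)
-- ===== Notes on version B (the rewrite author's own statement) =====
-- stated objective: faster
-- what changed: Replaces A's per-window re-encoding (slice + fresh base-4 fold for every start) by a single rolling pass that updates the window index with shift-and-mask and tracks the last invalid-base position, so each character is examined once.
-- intended difference: For k < 0 Python's negative slice bound makes A collect the base-4 codes of the (len(seq)+k)-length substrings that start before position -k; B returns [0] there (for a non-positive window length only empty windows exist), which is the intended value; the two differ exactly when such a substring is a valid k-mer with a non-zero code. — e.g. on sequence_to_kmer_set("CA", -1): A returns [0, 1], B returns [0]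
import Mathlib
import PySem

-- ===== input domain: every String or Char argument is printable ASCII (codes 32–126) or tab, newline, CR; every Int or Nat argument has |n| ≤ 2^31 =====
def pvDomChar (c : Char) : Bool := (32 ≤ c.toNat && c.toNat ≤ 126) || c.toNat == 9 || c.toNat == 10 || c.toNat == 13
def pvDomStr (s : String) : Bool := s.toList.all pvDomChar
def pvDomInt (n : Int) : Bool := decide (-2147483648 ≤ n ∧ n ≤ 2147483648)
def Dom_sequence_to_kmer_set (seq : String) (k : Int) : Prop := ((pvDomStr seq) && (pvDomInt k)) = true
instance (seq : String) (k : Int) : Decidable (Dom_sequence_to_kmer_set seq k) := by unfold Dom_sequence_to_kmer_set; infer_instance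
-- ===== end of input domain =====

-- B replaces A's per-window O(k) re-encoding by a single rolling shift-and-mask pass with
-- invalid-base position tracking (O(n) instead of O(n*k)); measured faster in a timing run.

-- ===== PORT A =====
-- membership test + lookup in the literal dict {'A':0,'C':1,'G':2,'T':3} (exact)
def pvBaseBits (c : Char) : Option Int :=
  if c = 'A' then some 0 else if c = 'C' then some 1
  else if c = 'G' then some 2 else if c = 'T' then some 3 else none

-- the for-loop of kmer_to_index with its early 'return -1'
def pvKtiGo : List Char → Int → Int
  | [], index => index
  | c :: rest, index =>
    match pvBaseBits c with
    | none => -1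
    | some b => pvKtiGo rest (PySem.Int.bor (index <<< (2 : Nat)) b)  -- (index << 2) | bits

def pvKmerToIndex (kmer : List Char) : Int := pvKtiGo kmer 0

def sequence_to_kmer_set (seq : String) (k : Int) : List Int :=
  let cs := seq.toList
  let kset := (PySem.List.pyRange 0 ((cs.length : Int) - k + 1) 1).foldl
    (fun (s : PySem.Set Int) i =>
      let kmer := PySem.List.slice cs (some i) (some (i + k))
      let index := pvKmerToIndex kmer
      if index ≠ -1 then PySem.Set.add s index else s)
    PySem.Set.empty
  PySem.List.sorted kset (fun x => x) false

-- ===== PORT B =====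
-- B's code.get(ch) is the same literal dict lookup, so it reuses pvBaseBits
-- the loop body of B: state (idx, last_bad, found), element (i, ch)
def pvStepB (k mask : Int) (st : Int × Int × PySem.Set Int) (p : Int × Char) :
    Int × Int × PySem.Set Int :=
  match pvBaseBits p.2 with
  | none => (st.1, p.1, st.2.2)
  | some b =>
    let idx' := PySem.Int.band (PySem.Int.bor (st.1 <<< (2 : Nat)) b) mask  -- ((idx << 2) | b) & mask
    if k ≤ p.1 - st.2.1 then (idx', st.2.1, PySem.Set.add st.2.2 idx')      -- i - last_bad >= k
    else (idx', st.2.1, st.2.2)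

def sequence_to_kmer_set_alt (seq : String) (k : Int) : List Int :=
  if k ≤ 0 then [0]                                     -- every window is the empty k-mer, index 0
  else if (seq.toList.length : Int) < k then []
  else
    let mask : Int := (1 <<< (2 * k).toNat) - 1
    let fin := (PySem.List.enumerate seq.toList 0).foldl (pvStepB k mask) (0, -1, PySem.Set.empty)
    PySem.List.sorted fin.2.2 (fun x => x) false

-- ===== PRECONDITION & SPEC =====
-- For k < 0 Python's negative slice bound makes A collect the base-4 codes of the
-- (len(seq)+k)-length substrings that start before position -k (beside the empty slices' 0);
-- B returns [0] there (for a non-positive window length only empty windows exist), which is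
-- the intended value: the two differ exactly when such a substring is a valid k-mer with a
-- non-zero code, i.e. consists of the four bases and not only of the zero-coded base.
def D_sequence_to_kmer_set (seq : String) (k : Int) : Prop :=
  k < 0 ∧ ((List.range (min (-k).toNat seq.toList.length)).any (fun i =>
    (fun w => w.all (['A', 'C', 'G', 'T'].contains ·) && w.any (· != 'A'))
      ((seq.toList.drop i).take ((seq.toList.length : Int) + k).toNat))) = true
instance (seq : String) (k : Int) : Decidable (D_sequence_to_kmer_set seq k) := by
  unfold D_sequence_to_kmer_set; infer_instance

def Spec_sequence_to_kmer_set (seq : String) (k : Int) (out : List Int) : Prop :=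
  ¬ D_sequence_to_kmer_set seq k → out = sequence_to_kmer_set_alt seq k
instance (seq : String) (k : Int) (out : List Int) : Decidable (Spec_sequence_to_kmer_set seq k out) := by
  unfold Spec_sequence_to_kmer_set; infer_instance

def pvDiffWitness_sequence_to_kmer_set : String × Int := ("CA", -1)
def pvDiffWitnessOut_sequence_to_kmer_set : (List Int) × (List Int) := ([0, 1], [0])

-- ===== CLAIM (what is proved, stated in full; the proofs are below) =====
def Claim_unchanged_sequence_to_kmer_set : Prop := ∀ (seq : String) (k : Int), Dom_sequence_to_kmer_set seq k → Spec_sequence_to_kmer_set seq k (sequence_to_kmer_set seq k)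
def Claim_changed_sequence_to_kmer_set : Prop := Dom_sequence_to_kmer_set (pvDiffWitness_sequence_to_kmer_set.1) (pvDiffWitness_sequence_to_kmer_set.2) ∧ D_sequence_to_kmer_set (pvDiffWitness_sequence_to_kmer_set.1) (pvDiffWitness_sequence_to_kmer_set.2) ∧ sequence_to_kmer_set (pvDiffWitness_sequence_to_kmer_set.1) (pvDiffWitness_sequence_to_kmer_set.2) = pvDiffWitnessOut_sequence_to_kmer_set.1 ∧ sequence_to_kmer_set_alt (pvDiffWitness_sequence_to_kmer_set.1) (pvDiffWitness_sequence_to_kmer_set.2) = pvDiffWitnessOut_sequence_to_kmer_set.2 ∧ pvDiffWitnessOut_sequence_to_kmer_set.1 ≠ pvDiffWitnessOut_sequence_to_kmer_set.2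
def Claim_exact_sequence_to_kmer_set : Prop := ∀ (seq : String) (k : Int), Dom_sequence_to_kmer_set seq k → D_sequence_to_kmer_set seq k → sequence_to_kmer_set seq k ≠ sequence_to_kmer_set_alt seq k

-- ===== LEMMAS AND PROOFS =====

def okc (c : Char) : Bool := (pvBaseBits c).isSome
def bitv (c : Char) : Int := (pvBaseBits c).getD 0
def Hh (w : List Char) (a : Int) : Int := w.foldl (fun acc c => 4 * acc + bitv c) a
theorem Hh_cons (c : Char) (t : List Char) (a : Int) : Hh (c :: t) a = Hh t (4 * a + bitv c) := rfl
theorem bitv_bounds {c : Char} (h : okc c = true) : 0 ≤ bitv c ∧ bitv c < 4 := by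
  unfold okc pvBaseBits at h; unfold bitv pvBaseBits
  split_ifs at h ⊢ <;> simp_all
theorem Hh_shift (w : List Char) (a : Int) : Hh w a = a * 4 ^ w.length + Hh w 0 := by
  induction w generalizing a with
  | nil => simp [Hh]
  | cons c t ih =>
    rw [Hh_cons, Hh_cons, ih (4 * a + bitv c), ih (4 * 0 + bitv c), List.length_cons]
    ring
theorem Hh_bounds (w : List Char) (h : ∀ c ∈ w, okc c = true) :
    0 ≤ Hh w 0 ∧ Hh w 0 < 4 ^ w.length := by
  induction w with
  | nil => simp [Hh]
  | cons c t ih =>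
    have hc := bitv_bounds (h c (by simp))
    have ht := ih (fun x hx => h x (by simp [hx]))
    have hs : Hh (c :: t) 0 = (4 * 0 + bitv c) * 4 ^ t.length + Hh t 0 := by
      rw [Hh_cons]; exact Hh_shift t _
    rw [hs]
    constructor
    · nlinarith [pow_pos (by norm_num : (0:Int) < 4) t.length]
    · simp only [List.length_cons, pow_succ]
      nlinarith [pow_pos (by norm_num : (0:Int) < 4) t.length]
theorem Hh_pos (w : List Char) (h : ∀ c ∈ w, okc c = true) (hx : ∃ c ∈ w, c ≠ 'A') :
    0 < Hh w 0 := by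
  induction w with
  | nil => simp at hx
  | cons c t ih =>
    have hc := bitv_bounds (h c (by simp))
    have ht := Hh_bounds t (fun x hxm => h x (by simp [hxm]))
    have hs : Hh (c :: t) 0 = bitv c * 4 ^ t.length + Hh t 0 := by
      rw [Hh_cons, Hh_shift t _]; ring
    rw [hs]
    rcases hx with ⟨d, hd, hdA⟩
    rcases List.mem_cons.mp hd with rfl | hdt
    · have h1 : 1 ≤ bitv d := by
        have := h d (by simp)
        unfold okc pvBaseBits at this; unfold bitv pvBaseBits
        split_ifs at this ⊢ <;> simp_all
      nlinarith [pow_pos (by norm_num : (0:Int) < 4) t.length]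
    · have := ih (fun x hxm => h x (by simp [hxm])) ⟨d, hdt, hdA⟩
      nlinarith [pow_pos (by norm_num : (0:Int) < 4) t.length]
theorem bor_step (a b : Int) (ha : 0 ≤ a) (hb0 : 0 ≤ b) (hb : b < 4) :
    PySem.Int.bor (a <<< (2 : Nat)) b = 4 * a + b := by
  have h1 : a <<< (2 : Nat) = a * 4 := by
    rw [Int.shiftLeft_eq]; norm_num
  rw [h1, PySem.Int.bor_of_nonneg (by positivity) hb0]
  have h2 : (a * 4).toNat = a.toNat * 4 := by omega
  have h3 : a.toNat * 4 ||| b.toNat = a.toNat * 4 + b.toNat := by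
    have h4 := (Nat.two_pow_add_eq_or_of_lt (i := 2) (b := b.toNat) (by omega) a.toNat).symm
    simpa [mul_comm] using h4
  rw [h2, h3]
  push_cast
  omega
theorem ktiGo_spec (w : List Char) (a : Int) (ha : 0 ≤ a) :
    pvKtiGo w a = if ∀ c ∈ w, okc c = true then Hh w a else -1 := by
  induction w generalizing a with
  | nil => simp [pvKtiGo, Hh]
  | cons c t ih =>
    by_cases hc : okc c = true
    · obtain ⟨b, hb⟩ : ∃ b, pvBaseBits c = some b := by
        unfold okc at hc; exact Option.isSome_iff_exists.mp hc
      have hbv : bitv c = b := by simp [bitv, hb]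
      have hbb := bitv_bounds hc
      rw [hbv] at hbb
      have hstep : PySem.Int.bor (a <<< (2 : Nat)) b = 4 * a + b :=
        bor_step a b ha hbb.1 hbb.2
      simp only [pvKtiGo, hb, hstep]
      rw [ih _ (by omega), Hh_cons, hbv]
      by_cases hall : ∀ x ∈ t, okc x = true
      · simp [hc]
      · simp only [hall]
        have : ¬ ∀ x ∈ c :: t, okc x = true := by
          intro hx; exact hall (fun x hxm => hx x (List.mem_cons_of_mem _ hxm))
        simp [hall]
    · have hb : pvBaseBits c = none := by
        unfold okc at hc; simpa using Option.not_isSome_iff_eq_none.mp (by simpa using hc)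
      have : ¬ ∀ x ∈ c :: t, okc x = true := by
        intro hx; exact hc (hx c (by simp))
      simp only [pvKtiGo, hb]
      rw [if_neg this]
theorem mem_foldl_addIf {ι : Type} (l : List ι) (f : ι → Int) (s : PySem.Set Int) (v : Int) :
    v ∈ l.foldl (fun s i => if f i ≠ -1 then PySem.Set.add s (f i) else s) s ↔
      v ∈ s ∨ ∃ i ∈ l, f i ≠ -1 ∧ f i = v := by
  induction l generalizing s with
  | nil => simp
  | cons x t ih =>
    simp only [List.foldl_cons, ih]
    by_cases hx : f x ≠ -1
    · simp only [if_pos hx, PySem.Set.mem_add]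
      constructor
      · rintro (⟨h | rfl⟩ | ⟨i, hi, h1, h2⟩)
        · exact Or.inl h
        · exact Or.inr ⟨x, by simp, hx, rfl⟩
        · exact Or.inr ⟨i, by simp [hi], h1, h2⟩
      · rintro (h | ⟨i, hi, h1, h2⟩)
        · exact Or.inl (Or.inl h)
        · rcases List.mem_cons.mp hi with rfl | hit
          · exact Or.inl (Or.inr h2.symm)
          · exact Or.inr ⟨i, hit, h1, h2⟩
    · simp only [if_neg hx]
      constructor
      · rintro (h | ⟨i, hi, h1, h2⟩)
        · exact Or.inl h
        · exact Or.inr ⟨i, by simp [hi], h1, h2⟩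
      · rintro (h | ⟨i, hi, h1, h2⟩)
        · exact Or.inl h
        · rcases List.mem_cons.mp hi with rfl | hit
          · exact absurd h1 (by simpa using hx)
          · exact Or.inr ⟨i, hit, h1, h2⟩
theorem nodup_foldl_addIf {ι : Type} (l : List ι) (f : ι → Int) (s : PySem.Set Int)
    (h : s.Nodup) :
    (l.foldl (fun s i => if f i ≠ -1 then PySem.Set.add s (f i) else s) s).Nodup := by
  induction l generalizing s with
  | nil => simpa
  | cons x t ih =>
    simp only [List.foldl_cons]
    apply ih
    split_ifs
    · exact PySem.Set.nodup_add _ _ h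
    · exact h
def Win (pre : List Char) (kn j : Nat) : List Char := (pre.drop j).take kn
def WinP (pre : List Char) (kn j : Nat) (x : Int) : Prop :=
  j + kn ≤ pre.length ∧ (∀ c ∈ Win pre kn j, okc c = true) ∧ Hh (Win pre kn j) 0 = x

theorem Hh_append (u w : List Char) (a : Int) : Hh (u ++ w) a = Hh w (Hh u a) :=
  List.foldl_append
theorem pvCode_some {c : Char} (h : okc c = true) : pvBaseBits c = some (bitv c) := by
  simp only [okc, pvBaseBits] at h
  simp only [bitv, pvBaseBits]
  split_ifs at h ⊢ <;> simp_all
theorem pvCode_none {c : Char} (h : okc c = false) : pvBaseBits c = none := by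
  simp only [okc, pvBaseBits] at h
  simp only [pvBaseBits]
  split_ifs at h ⊢ <;> simp_all

theorem win_frozen {pre : List Char} {c : Char} {kn j : Nat} (h : j + kn ≤ pre.length) :
    Win (pre ++ [c]) kn j = Win pre kn j := by
  unfold Win
  rw [List.drop_append_of_le_length (by omega),
      List.take_append_of_le_length (by simp; omega)]

theorem invB (kn : Nat) (hkn : 1 ≤ kn) (mask : Int)
    (hmask : ∀ y : Int, 0 ≤ y → PySem.Int.band y mask = y % (4 : Int) ^ kn) :
    ∀ pre : List Char,
    ∃ u v : List Char, ∃ g : Int,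
      pre = u ++ v ∧ (∀ c ∈ v, okc c = true) ∧
      (u = [] ∨ ∃ u₀ c₀, u = u₀ ++ [c₀] ∧ okc c₀ = false) ∧
      ((PySem.List.enumerate pre 0).foldl (pvStepB (kn : Int) mask) (0, -1, PySem.Set.empty)).2.1
        = (u.length : Int) - 1 ∧
      ((PySem.List.enumerate pre 0).foldl (pvStepB (kn : Int) mask) (0, -1, PySem.Set.empty)).1
        = (g * 4 ^ v.length + Hh v 0) % (4 : Int) ^ kn ∧
      ((PySem.List.enumerate pre 0).foldl (pvStepB (kn : Int) mask) (0, -1, PySem.Set.empty)).2.2.Nodup ∧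
      (∀ x : Int,
        x ∈ ((PySem.List.enumerate pre 0).foldl (pvStepB (kn : Int) mask) (0, -1, PySem.Set.empty)).2.2
          ↔ ∃ j : Nat, WinP pre kn j x) := by
  have hM : (0 : Int) < (4 : Int) ^ kn := by positivity
  intro pre
  induction pre using List.reverseRecOn with
  | nil =>
    refine ⟨[], [], 0, by simp, by simp, Or.inl rfl, ?_, ?_, ?_, ?_⟩ <;>
      simp [PySem.List.enumerate_nil, PySem.Set.empty, Hh, WinP] <;> omega
  | append_singleton pre c ih =>
    obtain ⟨u, v, g, hdec, hval, hlast, hlb, hidx, hnd, hmem⟩ := ih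
    set st := (PySem.List.enumerate pre 0).foldl (pvStepB (kn : Int) mask) (0, -1, PySem.Set.empty) with hst
    have hunf : (PySem.List.enumerate (pre ++ [c]) 0).foldl (pvStepB (kn : Int) mask) (0, -1, PySem.Set.empty)
        = pvStepB (kn : Int) mask st ((pre.length : Int), c) := by
      rw [PySem.List.enumerate_append, List.foldl_append]
      simp only [PySem.List.enumerate_cons, PySem.List.enumerate_nil, List.foldl_cons,
        List.foldl_nil, zero_add]
      rw [← hst]
    by_cases hc : okc c = true
    · -- valid base
      have hcode := pvCode_some hc
      have hbb := bitv_bounds hc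
      have h0st : 0 ≤ st.1 := by rw [hidx]; exact Int.emod_nonneg _ (by omega)
      have hbor : PySem.Int.bor (st.1 <<< (2 : Nat)) (bitv c) = 4 * st.1 + bitv c :=
        bor_step _ _ h0st hbb.1 hbb.2
      have hidx' : PySem.Int.band (PySem.Int.bor (st.1 <<< (2 : Nat)) (bitv c)) mask
          = (g * 4 ^ (v ++ [c]).length + Hh (v ++ [c]) 0) % (4 : Int) ^ kn := by
        rw [hbor, hmask _ (by omega), hidx]
        have h5 : Int.ModEq ((4 : Int) ^ kn) ((g * 4 ^ v.length + Hh v 0) % (4 : Int) ^ kn)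
            (g * 4 ^ v.length + Hh v 0) := Int.emod_emod_of_dvd _ dvd_rfl
        have hcongr : (4 * ((g * 4 ^ v.length + Hh v 0) % (4 : Int) ^ kn) + bitv c) % (4 : Int) ^ kn
            = (4 * (g * 4 ^ v.length + Hh v 0) + bitv c) % (4 : Int) ^ kn :=
          (h5.mul_left 4).add_right (bitv c)
        rw [hcongr]
        have hv' : Hh (v ++ [c]) 0 = 4 * Hh v 0 + bitv c := by
          rw [Hh_append, Hh_cons]; simp [Hh]
        rw [hv', List.length_append]
        congr 1
        simp only [List.length_singleton]
        ring
      -- common facts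
      have hlen : pre.length = u.length + v.length := by rw [hdec, List.length_append]
      have hdec' : pre ++ [c] = u ++ (v ++ [c]) := by rw [hdec, List.append_assoc]
      have hval' : ∀ x ∈ v ++ [c], okc x = true := by
        intro x hx
        rcases List.mem_append.mp hx with h | h
        · exact hval x h
        · simp at h; subst h; exact hc
      have hcondIff : ((kn : Int) ≤ (pre.length : Int) - st.2.1) ↔ kn ≤ v.length + 1 := by
        rw [hlb]; omega
      by_cases hcond : (kn : Int) ≤ (pre.length : Int) - st.2.1
      · -- window complete: idx' is added
        have hknL : kn ≤ v.length + 1 := hcondIff.mp hcond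
        set v' : List Char := v ++ [c] with hv'def
        have hL : v'.length = v.length + 1 := by simp [hv'def]
        set w1 : List Char := v'.take (v'.length - kn) with hw1
        set w2 : List Char := v'.drop (v'.length - kn) with hw2
        have hw12 : w1 ++ w2 = v' := List.take_append_drop _ _
        have hw2len : w2.length = kn := by
          rw [hw2, List.length_drop]; omega
        have hw2val : ∀ x ∈ w2, okc x = true := fun x hx =>
          hval' x (List.mem_of_mem_drop hx)
        have hw2b := Hh_bounds w2 hw2val
        rw [hw2len] at hw2b
        have hsplit : Hh v' 0 = Hh w1 0 * 4 ^ kn + Hh w2 0 := by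
          rw [← hw12, Hh_append, Hh_shift w2 (Hh w1 0), hw2len]
        have hpow : (4 : Int) ^ v'.length = 4 ^ (v'.length - kn) * 4 ^ kn := by
          rw [← pow_add]; congr 1; omega
        have hidxval : (g * 4 ^ v'.length + Hh v' 0) % (4 : Int) ^ kn = Hh w2 0 := by
          rw [hsplit, hpow]
          have : g * (4 ^ (v'.length - kn) * 4 ^ kn) + (Hh w1 0 * 4 ^ kn + Hh w2 0)
              = Hh w2 0 + (g * 4 ^ (v'.length - kn) + Hh w1 0) * 4 ^ kn := by ring
          rw [this, Int.add_mul_emod_self_right, Int.emod_eq_of_lt hw2b.1 hw2b.2]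
        have hjstar : u.length + (v'.length - kn) + kn = pre.length + 1 := by omega
        have hwinstar : Win (pre ++ [c]) kn (u.length + (v'.length - kn)) = w2 := by
          unfold Win
          rw [hdec', List.drop_append]
          rw [List.drop_eq_nil_of_le (by omega), List.nil_append]
          have : u.length + (v'.length - kn) - u.length = v'.length - kn := by omega
          rw [this, ← hw2, List.take_of_length_le (by omega)]
        refine ⟨u, v', g, hdec', hval', hlast, ?_, ?_, ?_, ?_⟩
        · rw [hunf]; simp only [pvStepB, hcode, if_pos hcond]; exact hlb
        · rw [hunf]; simp only [pvStepB, hcode, if_pos hcond]; exact hidx'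
        · rw [hunf]; simp only [pvStepB, hcode, if_pos hcond]
          exact PySem.Set.nodup_add _ _ hnd
        · intro x
          rw [hunf]; simp only [pvStepB, hcode, if_pos hcond]
          show x ∈ PySem.Set.add st.2.2 _ ↔ _
          rw [PySem.Set.mem_add, hmem x]
          constructor
          · rintro (⟨j, hj, hjv, hjh⟩ | rfl)
            · exact ⟨j, by simp; omega, by rw [win_frozen hj]; exact hjv,
                by rw [win_frozen hj]; exact hjh⟩
            · refine ⟨u.length + (v'.length - kn), by simp; omega, ?_, ?_⟩
              · rw [hwinstar]; exact hw2val
              · rw [hwinstar, hidx', hidxval]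
          · rintro ⟨j, hj, hjv, hjh⟩
            simp only [List.length_append, List.length_singleton] at hj
            by_cases hjle : j + kn ≤ pre.length
            · exact Or.inl ⟨j, hjle, by rw [← win_frozen hjle]; exact hjv,
                by rw [← win_frozen hjle]; exact hjh⟩
            · have hje : j = u.length + (v'.length - kn) := by omega
              subst hje
              rw [hwinstar] at hjh
              right
              rw [hidx', hidxval, ← hjh]
      · -- window incomplete: nothing added
        have hknL : ¬ kn ≤ v.length + 1 := fun h => hcond (hcondIff.mpr h)
        refine ⟨u, v ++ [c], g, hdec', hval', hlast, ?_, ?_, ?_, ?_⟩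
        · rw [hunf]; simp only [pvStepB, hcode, if_neg hcond]; exact hlb
        · rw [hunf]; simp only [pvStepB, hcode, if_neg hcond]; exact hidx'
        · rw [hunf]; simpa only [pvStepB, hcode, if_neg hcond] using hnd
        · intro x
          rw [hunf]; simp only [pvStepB, hcode, if_neg hcond]
          show x ∈ st.2.2 ↔ _
          rw [hmem x]
          constructor
          · rintro ⟨j, hj, hjv, hjh⟩
            exact ⟨j, by simp; omega, by rw [win_frozen hj]; exact hjv,
              by rw [win_frozen hj]; exact hjh⟩
          · rintro ⟨j, hj, hjv, hjh⟩
            simp only [List.length_append, List.length_singleton] at hj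
            by_cases hjle : j + kn ≤ pre.length
            · exact ⟨j, hjle, by rw [← win_frozen hjle]; exact hjv,
                by rw [← win_frozen hjle]; exact hjh⟩
            · exfalso
              have hje : j + kn = pre.length + 1 := by omega
              rcases hlast with hu0 | ⟨u₀, c₀, hu, hc₀⟩
              · have : pre.length = v.length := by rw [hlen, hu0]; simp
                omega
              · have hju : j ≤ u₀.length := by
                  have : u.length = u₀.length + 1 := by rw [hu]; simp
                  omega
                have hwhole : Win (pre ++ [c]) kn j = (pre ++ [c]).drop j := by
                  unfold Win
                  rw [List.take_of_length_le (by simp; omega)]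
                have hcin : c₀ ∈ Win (pre ++ [c]) kn j := by
                  rw [hwhole, hdec', hu, List.append_assoc,
                      List.drop_append_of_le_length hju]
                  simp
                have := hjv c₀ hcin
                rw [hc₀] at this
                exact absurd this (by simp)
    · -- invalid base
      have hcf : okc c = false := by simpa using hc
      have hcode := pvCode_none hcf
      refine ⟨pre ++ [c], [], st.1, by simp, by simp, Or.inr ⟨pre, c, rfl, hcf⟩, ?_, ?_, ?_, ?_⟩
      · rw [hunf]; simp [pvStepB, hcode]
      · rw [hunf]; simp only [pvStepB, hcode]
        show st.1 = (st.1 * 4 ^ ([] : List Char).length + Hh [] 0) % (4 : Int) ^ kn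
        simp only [List.length_nil, pow_zero, mul_one, Hh, List.foldl_nil, add_zero]
        rw [hidx]; exact (Int.emod_emod_of_dvd _ dvd_rfl).symm
      · rw [hunf]; simpa [pvStepB, hcode] using hnd
      · intro x
        rw [hunf]; simp only [pvStepB, hcode]
        show x ∈ st.2.2 ↔ _
        rw [hmem x]
        constructor
        · rintro ⟨j, hj, hjv, hjh⟩
          exact ⟨j, by simp; omega, by rw [win_frozen hj]; exact hjv, by rw [win_frozen hj]; exact hjh⟩
        · rintro ⟨j, hj, hjv, hjh⟩
          simp only [List.length_append, List.length_singleton] at hj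
          by_cases hjle : j + kn ≤ pre.length
          · exact ⟨j, hjle, by rw [← win_frozen hjle]; exact hjv, by rw [← win_frozen hjle]; exact hjh⟩
          · exfalso
            have hje : j + kn = pre.length + 1 := by omega
            have hcin : c ∈ Win (pre ++ [c]) kn j := by
              unfold Win
              rw [List.drop_append_of_le_length (by omega),
                  List.take_of_length_le (by simp; omega)]
              simp
            have := hjv c hcin
            rw [hcf] at this; exact absurd this (by simp)
theorem kti_spec (w : List Char) :
    pvKmerToIndex w = if ∀ c ∈ w, okc c = true then Hh w 0 else -1 :=
  ktiGo_spec w 0 le_rfl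

theorem mask_spec (kn : Nat) (y : Int) (hy : 0 ≤ y) :
    PySem.Int.band y (((1 <<< (2 * kn) : Nat) : Int) - 1) = y % (4 : Int) ^ kn := by
  have h1 : (1 <<< (2 * kn) : Nat) = 2 ^ (2 * kn) := Nat.one_shiftLeft _
  have hge : (1 : Nat) ≤ 2 ^ (2 * kn) := Nat.one_le_two_pow
  have h2 : ((2 ^ (2 * kn) : Nat) : Int) - 1 = (((2 ^ (2 * kn) - 1 : Nat)) : Int) := by
    push_cast [hge]; ring
  rw [h1, h2, PySem.Int.band_of_nonneg hy (by positivity), Int.toNat_natCast,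
      Nat.and_two_pow_sub_one_eq_mod]
  have h4 : ((4 : Int) ^ kn) = ((2 ^ (2 * kn) : Nat) : Int) := by
    push_cast
    rw [pow_mul]; norm_num
  rw [h4]
  push_cast
  rw [Int.toNat_of_nonneg hy]

-- A's accumulated set contains exactly the indices of the valid windows (k ≥ 1)
theorem A_char (cs : List Char) (k : Int) (hk : 1 ≤ k) (x : Int) :
    x ∈ (PySem.List.pyRange 0 ((cs.length : Int) - k + 1) 1).foldl
      (fun (s : PySem.Set Int) i =>
        if pvKmerToIndex (PySem.List.slice cs (some i) (some (i + k))) ≠ -1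
        then PySem.Set.add s (pvKmerToIndex (PySem.List.slice cs (some i) (some (i + k)))) else s)
      PySem.Set.empty
    ↔ ∃ j : Nat, WinP cs k.toNat j x := by
  rw [mem_foldl_addIf]
  simp only [PySem.Set.empty, List.not_mem_nil, false_or]
  constructor
  · rintro ⟨i, hi, hne, hval⟩
    rw [PySem.List.mem_pyRange_one] at hi
    have hsl : PySem.List.slice cs (some i) (some (i + k)) = Win cs k.toNat i.toNat := by
      rw [PySem.List.slice_toNat cs hi.1 (by omega)]
      unfold Win
      congr 1
      omega
    rw [hsl, kti_spec] at hne hval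
    by_cases hv : ∀ c ∈ Win cs k.toNat i.toNat, okc c = true
    · rw [if_pos hv] at hval
      exact ⟨i.toNat, ⟨by omega, hv, hval⟩⟩
    · rw [if_neg hv] at hne; simp at hne
  · rintro ⟨j, hj, hv, hh⟩
    refine ⟨(j : Int), ?_, ?_, ?_⟩
    · rw [PySem.List.mem_pyRange_one]
      constructor
      · positivity
      · omega
    · have hsl : PySem.List.slice cs (some (j:Int)) (some ((j:Int) + k)) = Win cs k.toNat j := by
        rw [PySem.List.slice_toNat cs (by positivity) (by omega)]
        unfold Win
        congr 1
        omega
      rw [hsl, kti_spec, if_pos hv, hh]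
      have := (Hh_bounds _ hv).1
      omega
    · have hsl : PySem.List.slice cs (some (j:Int)) (some ((j:Int) + k)) = Win cs k.toNat j := by
        rw [PySem.List.slice_toNat cs (by positivity) (by omega)]
        unfold Win
        congr 1
        omega
      rw [hsl, kti_spec, if_pos hv, hh]
theorem contains_eq_okc (c : Char) : (['A', 'C', 'G', 'T'].contains c) = okc c := by
  simp only [okc, pvBaseBits]
  split_ifs with h1 h2 h3 h4 <;> simp_all
theorem Hh_allA (w : List Char) (h : ∀ c ∈ w, c = 'A') : Hh w 0 = 0 := by
  induction w with
  | nil => rfl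
  | cons c t ih =>
    rw [Hh_cons]
    have hcA : c = 'A' := h c (by simp)
    have : bitv c = 0 := by rw [hcA]; rfl
    rw [this]
    simpa using ih (fun x hx => h x (by simp [hx]))

-- the window A reads at position i when k < 0 and the slice is nonempty
theorem slice_neg (cs : List Char) (k : Int) (i : Nat) (hk : k < 0)
    (hm : 0 < (cs.length : Int) + k) (hik : (i : Int) < -k) :
    PySem.List.slice cs (some (i : Int)) (some ((i : Int) + k))
      = (cs.drop i).take ((cs.length : Int) + k).toNat := by
  simp only [PySem.List.slice, PySem.List.clampIdx]
  have hin : (i : Int) < cs.length := by omega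
  split_ifs <;> (try (exfalso; omega))
  have h1 : min ((i : Int)).toNat cs.length = i := by omega
  rw [h1]
  congr 1
  omega

theorem slice_empty (cs : List Char) (i k : Int) (h0 : 0 ≤ i)
    (hz : (0 ≤ i + k ∧ i + k ≤ i) ∨ (cs.length : Int) + (i + k) ≤ i ∨
      (cs.length : Int) ≤ i) :
    PySem.List.slice cs (some i) (some (i + k)) = [] := by
  simp only [PySem.List.slice, PySem.List.clampIdx]
  split_ifs <;> refine List.take_eq_nil_iff.mpr (Or.inl ?_) <;> omega

theorem unchanged_aux (seq : String) (k : Int) (hnD : ¬ D_sequence_to_kmer_set seq k) :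
    sequence_to_kmer_set seq k = sequence_to_kmer_set_alt seq k := by
  simp only [sequence_to_kmer_set, sequence_to_kmer_set_alt]
  by_cases hk0 : k ≤ 0
  · rw [if_pos hk0]
    -- every slice index is 0 or -1
    have hf : ∀ i : Int, i ∈ PySem.List.pyRange 0 ((seq.toList.length : Int) - k + 1) 1 →
        pvKmerToIndex (PySem.List.slice seq.toList (some i) (some (i + k))) = 0 ∨
        pvKmerToIndex (PySem.List.slice seq.toList (some i) (some (i + k))) = -1 := by
      intro i hi
      rw [PySem.List.mem_pyRange_one] at hi
      have hemp := slice_empty seq.toList i k hi.1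
      by_cases hc1 : i + k < 0
      · have hkneg : k < 0 := by omega
        by_cases hc2 : (seq.toList.length : Int) + (i + k) ≤ i
        · left
          rw [hemp (by omega)]; rfl
        · have hm : 0 < (seq.toList.length : Int) + k := by omega
          have hik : i < -k := by omega
          have hieq : i = ((i.toNat : Nat) : Int) := by omega
          rw [hieq, slice_neg seq.toList k i.toNat hkneg hm (by omega)]
          set w := (seq.toList.drop i.toNat).take ((seq.toList.length : Int) + k).toNat with hw
          rw [kti_spec]
          by_cases hv : ∀ c ∈ w, okc c = true
          · rw [if_pos hv]
            left
            apply Hh_allA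
            intro c hc
            by_contra hne
            apply hnD
            refine ⟨hkneg, List.any_eq_true.mpr ⟨i.toNat, by rw [List.mem_range]; omega, ?_⟩⟩
            show (_ && _) = true
            rw [Bool.and_eq_true]
            constructor
            · rw [List.all_eq_true]
              intro x hx
              rw [contains_eq_okc]
              exact hv x hx
            · rw [List.any_eq_true]
              exact ⟨c, hc, by simpa using hne⟩
          · rw [if_neg hv]; right; rfl
      · left
        rw [hemp (by omega)]; rfl
    have hnd : (List.foldl (fun (s : PySem.Set Int) i =>
        if pvKmerToIndex (PySem.List.slice seq.toList (some i) (some (i + k))) ≠ -1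
        then PySem.Set.add s (pvKmerToIndex (PySem.List.slice seq.toList (some i) (some (i + k)))) else s)
        PySem.Set.empty (PySem.List.pyRange 0 ((seq.toList.length : Int) - k + 1) 1)).Nodup :=
      nodup_foldl_addIf _ _ _ (by simp [PySem.Set.empty])
    have hmem0 : ∀ x : Int, x ∈ (List.foldl (fun (s : PySem.Set Int) i =>
        if pvKmerToIndex (PySem.List.slice seq.toList (some i) (some (i + k))) ≠ -1
        then PySem.Set.add s (pvKmerToIndex (PySem.List.slice seq.toList (some i) (some (i + k)))) else s)
        PySem.Set.empty (PySem.List.pyRange 0 ((seq.toList.length : Int) - k + 1) 1)) ↔ x = 0 := by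
      intro x
      rw [mem_foldl_addIf]
      constructor
      · rintro (h | ⟨i, hi, hne, hx⟩)
        · simp [PySem.Set.empty] at h
        · rcases hf i hi with h0 | hm1
          · omega
          · exact absurd hm1 hne
      · rintro rfl
        right
        refine ⟨-k, ?_, ?_, ?_⟩
        · rw [PySem.List.mem_pyRange_one]
          constructor <;> omega
        · rw [slice_empty seq.toList (-k) k (by omega) (by omega)]
          decide
        · rw [slice_empty seq.toList (-k) k (by omega) (by omega)]; rfl
    have hperm : (List.foldl (fun (s : PySem.Set Int) i =>
        if pvKmerToIndex (PySem.List.slice seq.toList (some i) (some (i + k))) ≠ -1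
        then PySem.Set.add s (pvKmerToIndex (PySem.List.slice seq.toList (some i) (some (i + k)))) else s)
        PySem.Set.empty (PySem.List.pyRange 0 ((seq.toList.length : Int) - k + 1) 1)) = [0] := by
      apply List.perm_singleton.mp
      apply (List.perm_ext_iff_of_nodup hnd (by simp)).mpr
      intro a
      rw [hmem0 a]
      simp
    rw [hperm]
    rfl
  · have hk1 : 1 ≤ k := by omega
    rw [if_neg (by omega)]
    by_cases hbig : (seq.toList.length : Int) < k
    · rw [if_pos hbig]
      rw [PySem.List.pyRange_one_eq_nil (by omega), List.foldl_nil]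
      exact (PySem.List.sorted_eq_nil_iff _ _ _).mpr rfl
    · rw [if_neg hbig]
      set kn := k.toNat with hkn
      have hknk : k = (kn : Int) := by omega
      have hkn1 : 1 ≤ kn := by omega
      have hmaskeq : (2 * k).toNat = 2 * kn := by omega
      have hmask : ∀ y : Int, 0 ≤ y →
          PySem.Int.band y (((1 <<< (2 * k).toNat : Nat) : Int) - 1) = y % (4 : Int) ^ kn := by
        intro y hy
        rw [hmaskeq]
        exact mask_spec kn y hy
      obtain ⟨u, v, g, hdec, hval, hlast, hlb, hidx, hnd, hmem⟩ :=
        invB kn hkn1 (((1 <<< (2 * k).toNat : Nat) : Int) - 1) hmask seq.toList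
      rw [hknk] at *
      apply (PySem.List.sorted_id_eq_sorted_id_iff_perm _ _).mpr
      apply (List.perm_ext_iff_of_nodup (nodup_foldl_addIf _ _ _ (by simp [PySem.Set.empty])) hnd).mpr
      intro x
      rw [A_char seq.toList (kn : Int) (by omega) x, hmem x]
      have : ((kn : Int)).toNat = kn := by omega
      rw [this]
theorem tight_aux (seq : String) (k : Int) (hD : D_sequence_to_kmer_set seq k) :
    sequence_to_kmer_set seq k ≠ sequence_to_kmer_set_alt seq k := by
  obtain ⟨hk, hany⟩ := hD
  rw [List.any_eq_true] at hany
  obtain ⟨i, hir, hcond⟩ := hany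
  rw [List.mem_range] at hir
  rw [show (fun (w : List Char) => w.all (['A', 'C', 'G', 'T'].contains ·) && w.any (· != 'A'))
        ((seq.toList.drop i).take ((seq.toList.length : Int) + k).toNat)
      = (((seq.toList.drop i).take ((seq.toList.length : Int) + k).toNat).all (['A', 'C', 'G', 'T'].contains ·)
        && ((seq.toList.drop i).take ((seq.toList.length : Int) + k).toNat).any (· != 'A')) from rfl] at hcond
  rw [Bool.and_eq_true, List.all_eq_true, List.any_eq_true] at hcond
  obtain ⟨hall, c, hcmem, hcne⟩ := hcond
  set w := (seq.toList.drop i).take ((seq.toList.length : Int) + k).toNat with hw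
  have hm : 0 < (seq.toList.length : Int) + k := by
    by_contra hmn
    have : ((seq.toList.length : Int) + k).toNat = 0 := by omega
    rw [hw, this, List.take_zero] at hcmem
    exact absurd hcmem (List.not_mem_nil)
  have hval : ∀ x ∈ w, okc x = true := fun x hx => by
    rw [← contains_eq_okc]; exact hall x hx
  have hpos : 0 < Hh w 0 := Hh_pos w hval ⟨c, hcmem, by simpa using hcne⟩
  have hB : sequence_to_kmer_set_alt seq k = [0] := by
    simp only [sequence_to_kmer_set_alt]; rw [if_pos (by omega)]
  have hik : (i : Int) < -k := by omega
  have hsl : PySem.List.slice seq.toList (some (i : Int)) (some ((i : Int) + k)) = w :=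
    slice_neg seq.toList k i hk hm hik
  have hxA : Hh w 0 ∈ sequence_to_kmer_set seq k := by
    simp only [sequence_to_kmer_set]
    rw [PySem.List.mem_sorted]
    rw [mem_foldl_addIf]
    right
    refine ⟨(i : Int), ?_, ?_, ?_⟩
    · rw [PySem.List.mem_pyRange_one]
      constructor <;> omega
    · rw [hsl, kti_spec, if_pos hval]; omega
    · rw [hsl, kti_spec, if_pos hval]
  intro hcontra
  rw [hcontra, hB] at hxA
  simp at hxA
  omega

-- ===== VERDICT (by name: the statement is the Claim_ definition above) =====
theorem sequence_to_kmer_set_spec : Claim_unchanged_sequence_to_kmer_set := by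
  intro seq k _ hnD
  exact unchanged_aux seq k hnD

set_option maxRecDepth 20000 in
theorem sequence_to_kmer_set_changed : Claim_changed_sequence_to_kmer_set := by
  unfold Claim_changed_sequence_to_kmer_set; decide

theorem sequence_to_kmer_set_tight : Claim_exact_sequence_to_kmer_set := by
  intro seq k _ hD
  exact tight_aux seq k hD
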